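-- pv_equiv track=rewrite | github.com/Sawndip/unsupervised_growth | pythonNMDAchannelNoise/allSpikes.py | remap_ID
-- ===== SOURCE A (Python) =====
-- def remap_ID(order):
--     already_counted = []
--     remapped = []
--     ind = 0
--     for i in order:
--         if i in already_counted:
--             ind_in_counted = already_counted.index(i)
--             remapped.append(ind_in_counted)
--         else:
--             remapped.append(ind)
--             already_counted.append(i)
--             ind += 1
--
--     return remapped
-- ===== SOURCE B (Python) =====
-- def remap_ID(order):
--     firsts = sorted({order.index(x) for x in order})
--     return [firsts.index(order.index(x)) for x in order]
-- ===== Notes on version B (the rewrite author's own statement) =====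
-- stated objective: simpler
-- what changed: Replaces A's incremental seen-list with per-element .index scans by a global two-step computation: collect the set of first-occurrence positions, sort it, and map each element to the rank of its first occurrence in that sorted list.
import Mathlib
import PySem

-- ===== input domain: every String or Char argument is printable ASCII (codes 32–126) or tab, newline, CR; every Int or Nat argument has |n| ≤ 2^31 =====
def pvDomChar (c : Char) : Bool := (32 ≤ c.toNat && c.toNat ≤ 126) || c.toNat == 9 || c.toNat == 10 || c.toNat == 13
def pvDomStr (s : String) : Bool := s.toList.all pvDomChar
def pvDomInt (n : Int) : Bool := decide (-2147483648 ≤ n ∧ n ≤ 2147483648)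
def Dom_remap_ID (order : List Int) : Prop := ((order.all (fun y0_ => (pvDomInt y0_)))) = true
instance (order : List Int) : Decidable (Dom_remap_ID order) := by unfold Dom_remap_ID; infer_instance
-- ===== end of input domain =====

-- B replaces A's incremental seen-list (with per-element .index scans over it) by a global
-- two-step computation: sort the set of first-occurrence positions, then map each element to
-- the rank of its first occurrence in that sorted list (objective: simpler; same O(n^2) cost).

-- ===== PORT A =====
-- A's loop keeps (already_counted, remapped, ind); `.index` is guarded by the membership test,
-- so the `.getD 0` default is never taken.
def remap_ID (order : List Int) : List Int :=
  (order.foldl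
    (fun (st : List Int × List Int × Int) i =>
      let counted := st.1
      let remapped := st.2.1
      let ind := st.2.2
      if i ∈ counted then
        (counted, remapped ++ [((PySem.List.index? counted i).getD 0 : Int)], ind)
      else
        (counted ++ [i], remapped ++ [ind], ind + 1))
    ([], [], 0)).2.1

-- ===== PORT B =====
-- firsts = sorted({order.index(x) for x in order}); return [firsts.index(order.index(x)) for x in order]
-- Both .index calls are on present elements, so the `.getD 0` defaults are never taken.
def remap_ID_alt (order : List Int) : List Int :=
  let firsts := PySem.List.sorted
    (PySem.Set.ofList (order.map (fun x => (((PySem.List.index? order x).getD 0 : Nat) : Int))))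
    (fun p => p) false
  order.map (fun x =>
    (((PySem.List.index? firsts ((((PySem.List.index? order x).getD 0 : Nat) : Int))).getD 0 : Nat) : Int))

-- ===== PRECONDITION & SPEC =====
def Spec_remap_ID (order : List Int) (out : List Int) : Prop := out = remap_ID_alt order
instance (order : List Int) (out : List Int) : Decidable (Spec_remap_ID order out) := by unfold Spec_remap_ID; infer_instance

-- ===== CLAIM (what is proved, stated in full; the proofs are below) =====
def Claim_equal_remap_ID : Prop := ∀ (order : List Int), Dom_remap_ID order → Spec_remap_ID order (remap_ID order)

-- ===== LEMMAS AND PROOFS =====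

-- the common value both programs compute at an element x of `full`:
-- the number of distinct values of `full` whose first occurrence precedes x's first occurrence
def firstCnt (full : List Int) (x : Int) : Int :=
  ((PySem.List.dedup full).countP (fun v => decide (full.idxOf v < full.idxOf x)) : Int)

theorem index?_mem {l : List Int} {v : Int} (h : v ∈ l) :
    PySem.List.index? l v = some (l.idxOf v) := by
  obtain ⟨k, hk⟩ := Option.isSome_iff_exists.mp ((PySem.List.index?_isSome_iff l v).mpr h)
  obtain ⟨pre, suf, hsplit, hlen, hnp⟩ := (PySem.List.index?_eq_some_iff l v k).mp hk
  subst hsplit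
  rw [hk, List.idxOf_append_of_notMem hnp, List.idxOf_cons_self, Nat.add_zero, hlen]

-- in a list with strictly increasing keys, the index of a member is the number of
-- elements with a smaller key
theorem index?_of_pairwise_lt {κ : Type} [LinearOrder κ] (key : Int → κ) (c : List Int)
    (h : c.Pairwise (fun a b => key a < key b)) (x : Int) (hx : x ∈ c) :
    PySem.List.index? c x = some (c.countP (fun v => decide (key v < key x))) := by
  induction c with
  | nil => simp at hx
  | cons a t ih =>
    rw [List.pairwise_cons] at h
    by_cases hxa : x = a
    · subst hxa
      have h0 : t.countP (fun v => decide (key v < key x)) = 0 := by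
        rw [List.countP_eq_zero]
        intro v hv
        simp only [decide_eq_true_eq]
        exact not_lt_of_gt (h.1 v hv)
      rw [PySem.List.index?_cons_self, List.countP_cons, h0]
      simp
    · have hxt : x ∈ t := (List.mem_cons.mp hx).resolve_left hxa
      rw [PySem.List.index?_cons_of_ne t (Ne.symm hxa), ih h.2 hxt, List.countP_cons]
      have : decide (key a < key x) = true := decide_eq_true (h.1 x hxt)
      simp [this]

theorem dedup_snoc_mem (l : List Int) (x : Int) (hx : x ∈ l) :
    PySem.List.dedup (l ++ [x]) = PySem.List.dedup l := by
  simp [PySem.List.dedup_eq_ofList, PySem.Set.ofList_append_singleton, PySem.Set.add,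
        PySem.Set.mem_ofList, hx]

theorem dedup_snoc_notMem (l : List Int) (x : Int) (hx : x ∉ l) :
    PySem.List.dedup (l ++ [x]) = PySem.List.dedup l ++ [x] := by
  simp [PySem.List.dedup_eq_ofList, PySem.Set.ofList_append_singleton, PySem.Set.add,
        PySem.Set.mem_ofList, hx]

-- the dedup (first occurrences, in order) is strictly increasing in first-occurrence position
theorem dedup_pairwise_idxOf (l : List Int) :
    (PySem.List.dedup l).Pairwise (fun a b => l.idxOf a < l.idxOf b) := by
  induction l using List.reverseRecOn with
  | nil => simp [PySem.List.dedup_eq_ofList, PySem.Set.ofList]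
  | append_singleton l x ih =>
    have hsub : ∀ a ∈ PySem.List.dedup l, a ∈ l := fun a ha => (PySem.List.mem_dedup _ _).mp ha
    have htrans : (PySem.List.dedup l).Pairwise
        (fun a b => (l ++ [x]).idxOf a < (l ++ [x]).idxOf b) := by
      rw [List.pairwise_iff_getElem] at ih ⊢
      intro i j hi hj hij
      rw [List.idxOf_append_of_mem (hsub _ (List.getElem_mem hi)),
          List.idxOf_append_of_mem (hsub _ (List.getElem_mem hj))]
      exact ih i j hi hj hij
    by_cases hx : x ∈ l
    · rw [dedup_snoc_mem l x hx]
      exact htrans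
    · rw [dedup_snoc_notMem l x hx, List.pairwise_append]
      refine ⟨htrans, by simp, ?_⟩
      intro a ha b hb
      have hb' : b = x := by simpa using hb
      subst hb'
      rw [List.idxOf_append_of_mem (hsub _ ha), List.idxOf_append_of_notMem hx,
          List.idxOf_cons_self, Nat.add_zero]
      exact List.idxOf_lt_length_of_mem (hsub _ ha)

-- counting first occurrences before a cut t inside the prefix only depends on the prefix
theorem count_first_lt' (pre suf : List Int) (t : Nat) (ht : t ≤ pre.length) :
    (PySem.List.dedup (pre ++ suf)).countP (fun v => decide ((pre ++ suf).idxOf v < t))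
      = (PySem.List.dedup pre).countP (fun v => decide (pre.idxOf v < t)) := by
  rw [List.countP_eq_length_filter, List.countP_eq_length_filter]
  apply List.Perm.length_eq
  apply (List.perm_ext_iff_of_nodup ((PySem.List.nodup_dedup _).filter _)
    ((PySem.List.nodup_dedup _).filter _)).mpr
  intro v
  simp only [List.mem_filter, PySem.List.mem_dedup, decide_eq_true_eq]
  constructor
  · rintro ⟨hv, hlt⟩
    have hvpre : v ∈ pre := by
      by_contra hnp
      rw [List.idxOf_append_of_notMem hnp] at hlt
      omega
    rw [List.idxOf_append_of_mem hvpre] at hlt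
    exact ⟨hvpre, hlt⟩
  · rintro ⟨hv, hlt⟩
    exact ⟨List.mem_append_left _ hv, by rw [List.idxOf_append_of_mem hv]; exact hlt⟩

-- reference recursion mirroring A's per-step values
def refMap : List Int → List Int → List Int
  | _, [] => []
  | c, x :: xs =>
    if x ∈ c then ((PySem.List.index? c x).getD 0 : Int) :: refMap c xs
    else (c.length : Int) :: refMap (c ++ [x]) xs

theorem remap_ID_fold (xs : List Int) : ∀ (c acc : List Int),
    (xs.foldl
      (fun (st : List Int × List Int × Int) i =>
        let counted := st.1
        let remapped := st.2.1
        let ind := st.2.2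
        if i ∈ counted then
          (counted, remapped ++ [((PySem.List.index? counted i).getD 0 : Int)], ind)
        else
          (counted ++ [i], remapped ++ [ind], ind + 1))
      (c, acc, (c.length : Int))).2.1 = acc ++ refMap c xs := by
  induction xs with
  | nil => intro c acc; simp [refMap]
  | cons x xs ih =>
    intro c acc
    by_cases h : x ∈ c
    · simp only [List.foldl_cons, if_pos h]
      rw [ih c (acc ++ [((PySem.List.index? c x).getD 0 : Int)]), refMap, if_pos h]
      simp
    · simp only [List.foldl_cons, if_neg h]
      have hc : ((c.length : Int) + 1) = (((c ++ [x]).length : Nat) : Int) := by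
        simp [List.length_append]
      rw [hc, ih (c ++ [x]) (acc ++ [(c.length : Int)]), refMap, if_neg h]
      simp

-- A's per-step value at x is firstCnt of the whole list
theorem refMap_g (xs : List Int) : ∀ (pre : List Int),
    refMap (PySem.List.dedup pre) xs = xs.map (fun x => firstCnt (pre ++ xs) x) := by
  induction xs with
  | nil => intro pre; simp [refMap]
  | cons x xs ih =>
    intro pre
    have hassoc : (pre ++ [x]) ++ xs = pre ++ x :: xs := by
      rw [List.append_assoc, List.singleton_append]
    by_cases hx : x ∈ pre
    · have hmem : x ∈ PySem.List.dedup pre := (PySem.List.mem_dedup _ _).mpr hx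
      rw [refMap, if_pos hmem,
          index?_of_pairwise_lt (fun v => pre.idxOf v) _ (dedup_pairwise_idxOf pre) x hmem]
      have hhead : ((((PySem.List.dedup pre).countP
            (fun v => decide (pre.idxOf v < pre.idxOf x)) : Nat) : Int))
          = firstCnt (pre ++ x :: xs) x := by
        unfold firstCnt
        rw [List.idxOf_append_of_mem hx,
            count_first_lt' pre (x :: xs) (pre.idxOf x)
              (le_of_lt (List.idxOf_lt_length_of_mem hx))]
      rw [List.map_cons, ← hhead, Option.getD_some]
      have htail := ih (pre ++ [x])
      rw [dedup_snoc_mem pre x hx, hassoc] at htail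
      rw [htail]
    · have hmem : x ∉ PySem.List.dedup pre := fun hc => hx ((PySem.List.mem_dedup _ _).mp hc)
      rw [refMap, if_neg hmem]
      have hhead : (((PySem.List.dedup pre).length : Nat) : Int) = firstCnt (pre ++ x :: xs) x := by
        unfold firstCnt
        rw [List.idxOf_append_of_notMem hx, List.idxOf_cons_self, Nat.add_zero,
            count_first_lt' pre (x :: xs) pre.length (le_refl _)]
        congr 1
        symm
        rw [List.countP_eq_length]
        intro v hv
        exact decide_eq_true (List.idxOf_lt_length_of_mem ((PySem.List.mem_dedup _ _).mp hv))
      rw [List.map_cons, ← hhead]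
      have htail := ih (pre ++ [x])
      rw [dedup_snoc_notMem pre x hx, hassoc] at htail
      rw [htail]

-- B computes the same per-element value
theorem alt_eq (order : List Int) :
    remap_ID_alt order = order.map (fun x => firstCnt order x) := by
  unfold remap_ID_alt
  have hmap : order.map (fun x => (((PySem.List.index? order x).getD 0 : Nat) : Int))
      = order.map (fun v => ((order.idxOf v : Nat) : Int)) := by
    apply List.map_congr_left
    intro v hv
    rw [index?_mem hv, Option.getD_some]
  rw [hmap]
  apply List.map_congr_left
  intro x hx
  rw [index?_mem hx, Option.getD_some]
  have hpair : (PySem.List.sorted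
      (PySem.Set.ofList (order.map (fun v => ((order.idxOf v : Nat) : Int))))
      (fun p => p) false).Pairwise (fun (a b : Int) => a < b) :=
    PySem.List.sorted_ofList_pairwise_lt _
  have hmemf : ((order.idxOf x : Nat) : Int) ∈ PySem.List.sorted
      (PySem.Set.ofList (order.map (fun v => ((order.idxOf v : Nat) : Int))))
      (fun p => p) false := by
    rw [PySem.List.mem_sorted, PySem.Set.mem_ofList]
    exact List.mem_map.mpr ⟨x, hx, rfl⟩
  rw [index?_of_pairwise_lt (fun p => p) _ hpair _ hmemf, Option.getD_some]
  have h1 := (PySem.List.sorted_perm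
    (xs := PySem.Set.ofList (order.map (fun v => ((order.idxOf v : Nat) : Int))))
    (key := fun p => p) (rev := false)).countP_eq
    (fun q => decide (q < ((order.idxOf x : Nat) : Int)))
  have hperm2 : (PySem.Set.ofList (order.map (fun v => ((order.idxOf v : Nat) : Int)))).Perm
      ((PySem.List.dedup order).map (fun v => ((order.idxOf v : Nat) : Int))) := by
    apply (List.perm_ext_iff_of_nodup (PySem.Set.nodup_ofList _) ?_).mpr
    · intro p
      simp [PySem.Set.mem_ofList, List.mem_map]
    · apply (PySem.List.nodup_dedup order).map_on
      intro v hv w hw hvw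
      have hv' : v ∈ order := (PySem.List.mem_dedup _ _).mp hv
      have hw' : w ∈ order := (PySem.List.mem_dedup _ _).mp hw
      have hidx : order.idxOf v = order.idxOf w := by exact_mod_cast hvw
      have h1 : order[order.idxOf v]'(List.idxOf_lt_length_of_mem hv') = v :=
        List.getElem_idxOf _
      have h2 : order[order.idxOf w]'(List.idxOf_lt_length_of_mem hw') = w :=
        List.getElem_idxOf _
      rw [← h1, ← h2]
      simp [hidx]
  have h2 := hperm2.countP_eq (fun q => decide (q < ((order.idxOf x : Nat) : Int)))
  rw [h1, h2, List.countP_map]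
  unfold firstCnt
  congr 1
  apply List.countP_congr
  intro v hv
  simp [Function.comp, Nat.cast_lt]

-- ===== VERDICT (by name: the statement is the Claim_ definition above) =====
theorem remap_ID_spec : Claim_equal_remap_ID := by
  intro order _
  unfold Spec_remap_ID remap_ID
  rw [show (0 : Int) = ((([] : List Int).length : Nat) : Int) from rfl,
      remap_ID_fold order [] [], List.nil_append,
      show ([] : List Int) = PySem.List.dedup [] from rfl,
      refMap_g order [], List.nil_append, alt_eq]
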